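-- pv_equiv track=rewrite | github.com/rcghpge/aoc-proofing-repo | 2024/day-22/test2.py | sequence_search_worker
-- ===== SOURCE A (Python) =====
-- def mix_and_prune(secret, value, operation):
--     if operation == "multiply":
--         result = secret * value
--     elif operation == "divide":
--         result = secret // value
--     else:
--         raise ValueError("Invalid operation. Use 'multiply' or 'divide'.")
--     mixed = result ^ secret
--     pruned = mixed % 16777216
--     return pruned
--
-- def generate_secret_sequence(initial_secret, steps):
--     secret = initial_secret
--     sequence = []
--     for _ in range(steps):
--         sequence.append(secret)
--         secret = mix_and_prune(secret, 64, "multiply")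
--         secret = mix_and_prune(secret, 32, "divide")
--         secret = mix_and_prune(secret, 2048, "multiply")
--     return sequence
--
-- def sequence_search_worker(args):
--     secret, steps = args
--     secret_sequence = generate_secret_sequence(secret, steps)
--     prices = [s % 10 for s in secret_sequence]
--     price_changes = [prices[i] - prices[i - 1] for i in range(1, len(prices))]
--
--     best_sequence = None
--     max_bananas = 0
--
--     for i in range(len(price_changes) - 3):
--         sequence = tuple(price_changes[i:i + 4])
--         bananas = prices[i + 4]
--         if bananas > max_bananas:
--             best_sequence = sequence
--             max_bananas = bananas
--
--     return best_sequence, max_bananas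
-- ===== SOURCE B (Python) =====
-- def mix_and_prune(secret, value, operation):
--     if operation == "multiply":
--         result = secret * value
--     elif operation == "divide":
--         result = secret // value
--     else:
--         raise ValueError("Invalid operation. Use 'multiply' or 'divide'.")
--     mixed = result ^ secret
--     pruned = mixed % 16777216
--     return pruned
--
-- def generate_secret_sequence(initial_secret, steps):
--     secret = initial_secret
--     sequence = []
--     for _ in range(steps):
--         sequence.append(secret)
--         secret = mix_and_prune(secret, 64, "multiply")
--         secret = mix_and_prune(secret, 32, "divide")
--         secret = mix_and_prune(secret, 2048, "multiply")
--     return sequence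
--
-- def sequence_search_worker(args):
--     # Argmax-first: locate the best price once, then build only its preceding window.
--     secret, steps = args
--     secret_sequence = generate_secret_sequence(secret, steps)
--     prices = [s % 10 for s in secret_sequence]
--     price_changes = [prices[i] - prices[i - 1] for i in range(1, len(prices))]
--
--     tail = prices[4:]
--     max_price = max(tail, default=0)
--     if max_price <= 0:
--         return None, 0
--     j = tail.index(max_price)
--     return tuple(price_changes[j:j + 4]), max_price
-- ===== Notes on version B (the rewrite author's own statement) =====
-- stated objective: simpler
-- what changed: A scans every 4-change window with a running max and best-window accumulator; B instead takes the max of prices[4:] directly, returns (None, 0) if it is not positive, and otherwise builds only the single window of 4 changes preceding the first occurrence of that max.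
import Mathlib
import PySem

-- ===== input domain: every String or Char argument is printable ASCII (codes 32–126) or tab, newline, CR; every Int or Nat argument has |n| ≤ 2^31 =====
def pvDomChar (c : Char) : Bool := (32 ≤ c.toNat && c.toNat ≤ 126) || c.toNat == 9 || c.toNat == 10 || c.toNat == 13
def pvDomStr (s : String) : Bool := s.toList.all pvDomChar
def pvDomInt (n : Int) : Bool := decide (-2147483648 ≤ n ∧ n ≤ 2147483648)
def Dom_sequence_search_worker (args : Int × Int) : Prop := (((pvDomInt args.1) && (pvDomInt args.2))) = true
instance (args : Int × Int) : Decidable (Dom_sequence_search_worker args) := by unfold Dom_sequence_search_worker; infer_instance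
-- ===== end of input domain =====

-- B replaces A's window-scanning running-max loop by an argmax-first decomposition
-- (max of prices[4:], then the single preceding 4-change window); objective: simpler.


-- ===== PORT A =====
-- shared module helper; the final 'else' raises ValueError in Python but is unreachable at
-- every call site (operation is always a literal "multiply"/"divide"); ported as 0 there
def mix_and_prune (secret value : Int) (operation : String) : Int :=
  let result := if operation == "multiply" then secret * value
    else if operation == "divide" then PySem.Int.floordiv secret value
    else 0
  let mixed := PySem.Int.bxor result secret
  PySem.Int.mod mixed 16777216

def generate_secret_sequence (initial_secret steps : Int) : List Int :=
  ((PySem.List.pyRange 0 steps 1).foldl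
    (fun (st : Int × List Int) _ =>
      let secret := st.1
      let sequence := st.2 ++ [secret]
      let s1 := mix_and_prune secret 64 "multiply"
      let s2 := mix_and_prune s1 32 "divide"
      let s3 := mix_and_prune s2 2048 "multiply"
      (s3, sequence))
    (initial_secret, [])).2

def sequence_search_worker (args : Int × Int) : Option (List Int) × Int :=
  let secret := args.1
  let steps := args.2
  let secret_sequence := generate_secret_sequence secret steps
  let prices := secret_sequence.map (fun s => PySem.Int.mod s 10)
  let price_changes := (PySem.List.pyRange 1 (prices.length : Int) 1).map
    (fun i => PySem.List.pyGetD prices i 0 - PySem.List.pyGetD prices (i - 1) 0)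
  (PySem.List.pyRange 0 ((price_changes.length : Int) - 3) 1).foldl
    (fun (st : Option (List Int) × Int) i =>
      let sequence := PySem.List.slice price_changes (some i) (some (i + 4))
      let bananas := PySem.List.pyGetD prices (i + 4) 0
      if bananas > st.2 then (some sequence, bananas) else st)
    (none, 0)

-- ===== PORT B =====
def sequence_search_worker_alt (args : Int × Int) : Option (List Int) × Int :=
  let secret := args.1
  let steps := args.2
  let secret_sequence := generate_secret_sequence secret steps
  let prices := secret_sequence.map (fun s => PySem.Int.mod s 10)
  let price_changes := (PySem.List.pyRange 1 (prices.length : Int) 1).map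
    (fun i => PySem.List.pyGetD prices i 0 - PySem.List.pyGetD prices (i - 1) 0)
  let tail := PySem.List.slice prices (some 4) none
  let max_price := match PySem.List.max? tail (fun x => x) with
    | some m => m
    | none => 0
  if max_price ≤ 0 then (none, 0)
  else
    match PySem.List.index? tail max_price with
    | some j =>
        (some (PySem.List.slice price_changes (some (j : Int)) (some ((j : Int) + 4))), max_price)
    | none => (none, 0)  -- unreachable: max_price is an element of tail here

-- ===== PRECONDITION & SPEC =====
def Spec_sequence_search_worker (args : Int × Int) (out : Option (List Int) × Int) : Prop := out = sequence_search_worker_alt args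
instance (args : Int × Int) (out : Option (List Int) × Int) : Decidable (Spec_sequence_search_worker args out) := by unfold Spec_sequence_search_worker; infer_instance

-- ===== CLAIM (what is proved, stated in full; the proofs are below) =====
def Claim_equal_sequence_search_worker : Prop := ∀ (args : Int × Int), Dom_sequence_search_worker args → Spec_sequence_search_worker args (sequence_search_worker args)

-- ===== LEMMAS AND PROOFS =====

def bShape (c t : List Int) : Option (List Int) × Int :=
  let m := match PySem.List.max? t (fun x => x) with
    | some m => m
    | none => 0
  if m ≤ 0 then (none, 0)
  else
    match PySem.List.index? t m with
    | some j => (some (PySem.List.slice c (some (j : Int)) (some ((j : Int) + 4))), m)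
    | none => (none, 0)

lemma max?_append_singleton (t : List Int) (x m : Int)
    (h : PySem.List.max? t (fun y => y) = some m) :
    PySem.List.max? (t ++ [x]) (fun y => y) = some (max m x) := by
  cases t with
  | nil => simp [PySem.List.max?] at h
  | cons y s =>
    rw [PySem.List.max?_id_cons] at h
    rw [List.cons_append, PySem.List.max?_id_cons, List.foldl_append]
    simp at h ⊢
    omega

lemma loop_eq (c t : List Int) :
    (List.range t.length).foldl
      (fun (st : Option (List Int) × Int) (k : Nat) =>
        if t.getD k 0 > st.2
        then (some (PySem.List.slice c (some (k : Int)) (some ((k : Int) + 4))), t.getD k 0)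
        else st)
      (none, 0)
    = bShape c t := by
  induction t using List.reverseRecOn with
  | nil => rfl
  | append_singleton t x ih =>
    have hlen : (t ++ [x]).length = t.length + 1 := by simp
    rw [hlen, List.range_succ, List.foldl_append]
    have hpre : (List.range t.length).foldl
        (fun (st : Option (List Int) × Int) (k : Nat) =>
          if (t ++ [x]).getD k 0 > st.2
          then (some (PySem.List.slice c (some (k : Int)) (some ((k : Int) + 4))), (t ++ [x]).getD k 0)
          else st)
        (none, 0)
      = bShape c t := by
      rw [PySem.List.foldl_congr_mem (g := fun (st : Option (List Int) × Int) (k : Nat) =>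
          if t.getD k 0 > st.2
          then (some (PySem.List.slice c (some (k : Int)) (some ((k : Int) + 4))), t.getD k 0)
          else st)]
      · exact ih
      · intro acc k hk
        rw [List.getD_append _ _ _ _ (List.mem_range.1 hk)]
    rw [hpre]
    have hx : (t ++ [x]).getD t.length 0 = x := by
      simp [List.getD_eq_getElem?_getD]
    simp only [List.foldl_cons, List.foldl_nil, hx]
    rcases ht : PySem.List.max? t (fun y => y) with _ | m
    · -- t = []
      have : t = [] := (PySem.List.max?_eq_none_iff t _).1 ht
      subst this
      by_cases hx0 : x ≤ 0
      · simp [bShape, PySem.List.max?_id_cons, hx0, show ¬ (0:Int) < x by omega]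
      · simp [bShape, PySem.List.max?_id_cons, hx0, show (0:Int) < x by omega]
    · have hmem : m ∈ t := PySem.List.max?_mem ht
      have hmax : ∀ y ∈ t, y ≤ m := fun y hy => PySem.List.max?_isMax ht y hy
      have hBmax := max?_append_singleton t x m ht
      have hsnd : (bShape c t).2 = if m ≤ 0 then 0 else m := by
        simp only [bShape, ht]
        split_ifs with h
        · rfl
        · rcases hj : PySem.List.index? t m with _ | j
          · exact absurd ((PySem.List.index?_eq_none_iff t m).1 hj) (by simp [hmem])
          · rfl
      by_cases hxm : m < x
      · have hxe : max m x = x := by omega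
        have hxnot : x ∉ t := fun hxt => absurd (hmax x hxt) (by omega)
        have hidx2 : PySem.List.index? (t ++ [x]) x = some t.length :=
          PySem.List.index?_append_singleton_self t x hxnot
        by_cases hx0 : x ≤ 0
        · have hm0 : m ≤ 0 := by omega
          have hBt : bShape c t = (none, 0) := by simp [bShape, ht, hm0]
          rw [hBt]
          simp only [bShape, hBmax, hxe]
          simp [hx0, show ¬ (0:Int) < x by omega]
        · have h2 : (bShape c t).2 < x := by rw [hsnd]; split_ifs <;> omega
          rw [if_pos h2]
          simp only [bShape, hBmax, hxe, hidx2]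
          simp [hx0]
      · have hxe : max m x = m := by omega
        have hidx := PySem.List.index?_append_of_mem (t := [x]) hmem
        have h2 : ¬ (bShape c t).2 < x := by rw [hsnd]; split_ifs <;> omega
        rw [if_neg h2]
        simp only [bShape, hBmax, hxe, hidx, ht]

lemma core_eq (p c : List Int) (hc : c.length = p.length - 1) :
    (PySem.List.pyRange 0 ((c.length : Int) - 3) 1).foldl
      (fun (st : Option (List Int) × Int) i =>
        let sequence := PySem.List.slice c (some i) (some (i + 4))
        let bananas := PySem.List.pyGetD p (i + 4) 0
        if bananas > st.2 then (some sequence, bananas) else st)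
      (none, 0)
    = bShape c (PySem.List.slice p (some 4) none) := by
  have hslice : PySem.List.slice p (some 4) none = p.drop 4 := by
    simp [pysem]
  rw [hslice, PySem.List.pyRange_one, List.foldl_map]
  have hn : (((c.length : Int) - 3) - 0).toNat = (p.drop 4).length := by
    simp only [List.length_drop]; omega
  rw [hn]
  rw [PySem.List.foldl_congr_mem (g := fun (st : Option (List Int) × Int) (k : Nat) =>
      if (p.drop 4).getD k 0 > st.2
      then (some (PySem.List.slice c (some (k : Int)) (some ((k : Int) + 4))), (p.drop 4).getD k 0)
      else st)]
  · exact loop_eq c (p.drop 4)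
  · intro acc k hk
    have hg : PySem.List.pyGetD p (0 + (k : Int) + 4) 0 = (p.drop 4).getD k 0 := by
      have h4 : (0 + (k : Int) + 4) = ((k + 4 : Nat) : Int) := by push_cast; ring
      rw [h4, PySem.List.pyGetD_natCast]
      simp [List.getD_eq_getElem?_getD, List.getElem?_drop, Nat.add_comm]
    simp only [hg]
    norm_num

-- ===== VERDICT (by name: the statement is the Claim_ definition above) =====
theorem sequence_search_worker_spec : Claim_equal_sequence_search_worker := by
  intro args _
  obtain ⟨secret, steps⟩ := args
  show sequence_search_worker (secret, steps) = sequence_search_worker_alt (secret, steps)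
  have hc : ∀ (q : List Int),
      ((PySem.List.pyRange 1 (q.length : Int) 1).map
        (fun i => PySem.List.pyGetD q i 0 - PySem.List.pyGetD q (i - 1) 0)).length
      = q.length - 1 := by
    intro q
    simp [PySem.List.length_pyRange_one]
  exact core_eq _ _ (hc _)
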